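-- pv_equiv track=rewrite | github.com/m-jim-d/pet-code | A02.1_string_rendering_v1.py | render_airtrack
-- ===== SOURCE A (Python) =====
-- def render_airtrack(x_px, x_left_edge_px, x_right_edge_px):
--     string = ''
--     display_width_px = 126 # 126/7 = 18 meters
--     for j in range(0, display_width_px):
--         if (j == x_px):
--             string += '*'
--         elif (j==x_left_edge_px) or (j==x_right_edge_px):
--             string += '|'
--         else:
--             string += ' '
--     return string
-- ===== SOURCE B (Python) =====
-- def render_airtrack(x_px, x_left_edge_px, x_right_edge_px):
--     chars = [' '] * 126
--     for pos in (x_left_edge_px, x_right_edge_px):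
--         if 0 <= pos < 126:
--             chars[pos] = '|'
--     if 0 <= x_px < 126:
--         chars[x_px] = '*'  # written last: the cart marker wins on coincident positions
--     return ''.join(chars)
-- ===== Notes on version B (the rewrite author's own statement) =====
-- stated objective: simpler
-- what changed: Instead of scanning all 126 positions and testing each index against the three markers, B fills a buffer of 126 spaces and writes '|' at the two edges and '*' at x_px (last, so it wins on coincidence), each write guarded by 0 <= pos < 126.
import Mathlib
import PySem

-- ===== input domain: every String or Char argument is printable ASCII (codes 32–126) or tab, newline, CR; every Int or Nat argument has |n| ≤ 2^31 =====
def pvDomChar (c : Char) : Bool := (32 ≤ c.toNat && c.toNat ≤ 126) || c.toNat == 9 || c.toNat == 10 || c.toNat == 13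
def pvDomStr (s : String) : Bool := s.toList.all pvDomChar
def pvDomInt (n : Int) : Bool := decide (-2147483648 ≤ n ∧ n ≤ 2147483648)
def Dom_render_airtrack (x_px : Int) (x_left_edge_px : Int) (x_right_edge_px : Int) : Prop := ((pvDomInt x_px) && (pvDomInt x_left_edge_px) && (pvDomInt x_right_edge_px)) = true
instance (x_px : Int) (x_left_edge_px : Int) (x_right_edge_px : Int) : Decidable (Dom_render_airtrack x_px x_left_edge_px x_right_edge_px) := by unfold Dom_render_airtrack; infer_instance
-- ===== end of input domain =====

-- B fills a 126-space buffer and writes the three markers at their positions instead of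
-- scanning every cell: simpler decomposition, same exact output.

-- ===== PORT A =====
-- Literal port of A: fold over range(0, 126), appending '*', '|' or ' ' for each j.
def render_airtrack (x_px : Int) (x_left_edge_px : Int) (x_right_edge_px : Int) : String :=
  String.mk ((PySem.List.pyRange 0 126 1).foldl
    (fun string j =>
      string ++ [if j = x_px then '*'
                 else if j = x_left_edge_px ∨ j = x_right_edge_px then '|'
                 else ' ']) [])

-- ===== PORT B =====
-- B: buffer of 126 spaces; write each marker at its position, guarded by 0 <= pos < 126.
def writeAt (cs : List Char) (pos : Int) (c : Char) : List Char :=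
  if 0 ≤ pos ∧ pos < 126 then cs.set pos.toNat c else cs

def render_airtrack_alt (x_px : Int) (x_left_edge_px : Int) (x_right_edge_px : Int) : String :=
  String.mk (writeAt (writeAt (writeAt (List.replicate 126 ' ')
    x_left_edge_px '|') x_right_edge_px '|') x_px '*')

-- ===== PRECONDITION & SPEC =====
def Spec_render_airtrack (x_px : Int) (x_left_edge_px : Int) (x_right_edge_px : Int) (out : String) : Prop := out = render_airtrack_alt x_px x_left_edge_px x_right_edge_px
instance (x_px : Int) (x_left_edge_px : Int) (x_right_edge_px : Int) (out : String) : Decidable (Spec_render_airtrack x_px x_left_edge_px x_right_edge_px out) := by unfold Spec_render_airtrack; infer_instance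

-- ===== CLAIM (what is proved, stated in full; the proofs are below) =====
def Claim_equal_render_airtrack : Prop := ∀ (x_px : Int) (x_left_edge_px : Int) (x_right_edge_px : Int), Dom_render_airtrack x_px x_left_edge_px x_right_edge_px → Spec_render_airtrack x_px x_left_edge_px x_right_edge_px (render_airtrack x_px x_left_edge_px x_right_edge_px)

-- ===== LEMMAS AND PROOFS =====
theorem writeAt_getElem? (cs : List Char) (pos : Int) (c : Char) (k : Nat)
    (hlen : cs.length = 126) (hk : k < 126) :
    (writeAt cs pos c)[k]? = if pos = (k : Int) then some c else cs[k]? := by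
  unfold writeAt
  split_ifs with h h2 h2
  · simp [List.getElem?_set, hlen]
    split_ifs <;> first | rfl | omega
  · simp [List.getElem?_set, hlen]
    intro h3; exfalso; apply h2; omega
  · exfalso; omega
  · rfl

theorem list_eq (x l r : Int) :
    (PySem.List.pyRange 0 126 1).foldl
      (fun string j =>
        string ++ [if j = x then '*'
                   else if j = l ∨ j = r then '|'
                   else ' ']) []
    = writeAt (writeAt (writeAt (List.replicate 126 ' ') l '|') r '|') x '*' := by
  rw [PySem.List.foldl_append_singleton_eq_map, List.nil_append]
  apply List.ext_getElem?
  intro k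
  by_cases hk : k < 126
  · rw [List.getElem?_map, PySem.List.getElem?_pyRange_one,
        if_pos (show k < ((126:Int) - 0).toNat by omega)]
    simp only [Option.map_some, zero_add]
    rw [writeAt_getElem? _ _ _ _ (by simp [writeAt]; split_ifs <;> simp) hk]
    rw [writeAt_getElem? _ _ _ _ (by simp [writeAt]; split_ifs <;> simp) hk]
    rw [writeAt_getElem? _ _ _ _ (by simp) hk]
    simp only [List.getElem?_replicate, hk, if_pos]
    split_ifs <;> first | rfl | (exfalso; omega)
  · have h1 : ((PySem.List.pyRange 0 126 1).map (fun j => if j = x then '*'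
        else if j = l ∨ j = r then '|' else ' '))[k]? = none := by
      apply List.getElem?_eq_none
      simp [PySem.List.length_pyRange_one]; omega
    have h2 : (writeAt (writeAt (writeAt (List.replicate 126 ' ') l '|') r '|') x '*')[k]? = none := by
      apply List.getElem?_eq_none
      simp [writeAt]; split_ifs <;> simp <;> omega
    rw [h1, h2]

-- ===== VERDICT (by name: the statement is the Claim_ definition above) =====
theorem render_airtrack_spec : Claim_equal_render_airtrack := by
  intro x l r _
  unfold Spec_render_airtrack render_airtrack render_airtrack_alt
  rw [list_eq]
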